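-- pv_equiv track=rewrite | github.com/saka16888/python | Training/HackRank/Warm-up/SockMerchant.py | count_sock_pairs
-- ===== SOURCE A (Python) =====
-- def count_sock_pairs(n, ar):
--     # Dictionary to count occurrences of each color
--     color_count = {}
--
--     for color in ar:
--         if color in color_count:
--             color_count[color] += 1
--         else:
--             color_count[color] = 1
--
--     # Count pairs
--     pairs = 0
--     for count in color_count.values():
--         pairs += count // 2  # Integer division counts pairs
--
--     return pairs
-- ===== SOURCE B (Python) =====
-- def count_sock_pairs(n, ar):
--     # Sort, then count pairs in one pass over runs of equal colors.
--     total = 0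
--     run = 0
--     cur = None
--     for c in sorted(ar):
--         if c == cur:
--             run += 1
--         else:
--             total += run // 2
--             cur = c
--             run = 1
--     return total + run // 2
-- ===== Notes on version B (the rewrite author's own statement) =====
-- stated objective: alternative
-- what changed: Replaces the hash-map color counter plus a second pass over its values by sorting the list and counting pairs in a single pass over runs of consecutive equal colors.
import Mathlib
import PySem

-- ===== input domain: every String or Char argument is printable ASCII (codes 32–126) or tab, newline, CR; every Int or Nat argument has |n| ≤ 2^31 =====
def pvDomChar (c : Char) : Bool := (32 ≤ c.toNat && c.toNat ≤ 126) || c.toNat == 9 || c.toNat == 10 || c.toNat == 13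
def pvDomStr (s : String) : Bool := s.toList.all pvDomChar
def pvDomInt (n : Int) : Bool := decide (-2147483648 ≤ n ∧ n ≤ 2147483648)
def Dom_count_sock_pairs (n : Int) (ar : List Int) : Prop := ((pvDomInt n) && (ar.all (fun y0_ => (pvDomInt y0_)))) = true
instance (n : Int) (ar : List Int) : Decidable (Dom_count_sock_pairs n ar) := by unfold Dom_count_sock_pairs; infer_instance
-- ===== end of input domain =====

-- B replaces A's hash-map color counter + second pass over its values by sorting and one grouping pass over runs (alternative algorithm; no speed claim).

-- ===== PORT A =====
def count_sock_pairs (n : Int) (ar : List Int) : Int :=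
  let color_count : PySem.Dict Int Int :=
    ar.foldl (fun d color =>
      if d.contains color then d.insert color (d.getD color 0 + 1)
      else d.insert color 1) PySem.Dict.empty
  color_count.values.foldl (fun pairs count => pairs + PySem.Int.floordiv count 2) 0

-- ===== PORT B =====
def count_sock_pairs_alt (n : Int) (ar : List Int) : Int :=
  let st := (PySem.List.sorted ar (fun x => x) false).foldl
    (fun (st : Int × Int × Option Int) c =>
      if some c == st.2.2 then (st.1, st.2.1 + 1, st.2.2)
      else (st.1 + PySem.Int.floordiv st.2.1 2, 1, some c))
    (0, 0, none)
  st.1 + PySem.Int.floordiv st.2.1 2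

-- ===== PRECONDITION & SPEC =====
def Spec_count_sock_pairs (n : Int) (ar : List Int) (out : Int) : Prop := out = count_sock_pairs_alt n ar
instance (n : Int) (ar : List Int) (out : Int) : Decidable (Spec_count_sock_pairs n ar out) := by unfold Spec_count_sock_pairs; infer_instance

-- ===== CLAIM (what is proved, stated in full; the proofs are below) =====
def Claim_equal_count_sock_pairs : Prop := ∀ (n : Int) (ar : List Int), Dom_count_sock_pairs n ar → Spec_count_sock_pairs n ar (count_sock_pairs n ar)

-- ===== LEMMAS AND PROOFS =====

-- Common value: sum over distinct colors of ⌊count/2⌋.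
def pairSum (l : List Int) : Int :=
  ((PySem.Set.ofList l).map (fun k => PySem.Int.floordiv (l.count k : Int) 2)).sum

-- B's loop step, named for the proofs.
def stepB (st : Int × Int × Option Int) (c : Int) : Int × Int × Option Int :=
  if some c == st.2.2 then (st.1, st.2.1 + 1, st.2.2)
  else (st.1 + PySem.Int.floordiv st.2.1 2, 1, some c)

-- A's dict-building step equals the standard counter step.
lemma stepA_eq (d : PySem.Dict Int Int) (c : Int) :
    (if d.contains c then d.insert c (d.getD c 0 + 1) else d.insert c 1)
      = d.insert c (d.getD c 0 + 1) := by
  by_cases h : d.contains c = true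
  · simp [h]
  · have h' : d.contains c = false := by simpa using h
    have h0 : d.getD c 0 = 0 := PySem.Dict.getD_of_not_contains d 0 h'
    simp [h, h0]

lemma foldl_add_fd (l : List Int) (t : Int) :
    l.foldl (fun p v => p + PySem.Int.floordiv v 2) t
      = t + (l.map (fun v => PySem.Int.floordiv v 2)).sum := by
  induction l generalizing t with
  | nil => simp
  | cons x xs ih => rw [List.foldl_cons, ih, List.map_cons, List.sum_cons]; ring

lemma a_eq_pairSum (n : Int) (ar : List Int) : count_sock_pairs n ar = pairSum ar := by
  show (ar.foldl (fun d color =>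
      if d.contains color then d.insert color (d.getD color 0 + 1)
      else d.insert color 1) PySem.Dict.empty).values.foldl
        (fun pairs count => pairs + PySem.Int.floordiv count 2) 0 = pairSum ar
  have hstep : (fun (d : PySem.Dict Int Int) color =>
      if d.contains color then d.insert color (d.getD color 0 + 1)
      else d.insert color 1)
      = fun d color => d.insert color (d.getD color 0 + 1) := by
    funext d c; exact stepA_eq d c
  rw [hstep, PySem.Dict.foldl_insert_getD_add_one_eq_counter]
  have hv : (PySem.Dict.counter ar).values
      = (PySem.Set.ofList ar).map (fun k => (ar.count k : Int)) := by
    show (PySem.Dict.counter ar).items.map (·.2) = _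
    rw [PySem.Dict.items_counter]
    simp [List.map_map, Function.comp]
  rw [hv, foldl_add_fd, pairSum, List.map_map]
  simp [Function.comp_def]

-- folding Set.add ignores elements already present in the accumulator
lemma foldl_add_filter (xs : List Int) :
    ∀ (s : PySem.Set Int) (x : Int), x ∈ s →
      xs.foldl PySem.Set.add s = (xs.filter (fun y => y != x)).foldl PySem.Set.add s := by
  induction xs with
  | nil => intro s x _; simp
  | cons y ys ih =>
    intro s x hx
    by_cases hy : y = x
    · subst hy
      have hadd : PySem.Set.add s y = s := by
        have : s.contains y = true := by
          simpa using hx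
        simp [PySem.Set.add, hx]
      rw [List.filter_cons]
      simp only [bne_self_eq_false, Bool.false_eq_true, if_false]
      rw [List.foldl_cons, hadd, ih s y hx]
    · have hmem : x ∈ PySem.Set.add s y := by
        simp only [PySem.Set.mem_add]
        tauto
      rw [List.filter_cons]
      have : (y != x) = true := by simpa using hy
      rw [this, if_pos rfl, List.foldl_cons, List.foldl_cons, ih _ x hmem]

lemma foldl_add_cons_out (m : List Int) :
    ∀ (s : List Int) (x : Int), x ∉ m →
      m.foldl PySem.Set.add (x :: s) = x :: m.foldl PySem.Set.add s := by
  induction m with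
  | nil => intro s x _; rfl
  | cons y ys ih =>
    intro s x hx
    have hyx : (y == x) = false := by
      simp only [beq_eq_false_iff_ne, ne_eq]
      intro h; exact hx (h ▸ List.mem_cons_self ..)
    have hadd : PySem.Set.add (x :: s) y = x :: PySem.Set.add s y := by
      simp only [PySem.Set.add, PySem.Set.contains, List.contains_cons, hyx, Bool.false_or]
      by_cases h : y ∈ s <;> simp [h]
    rw [List.foldl_cons, hadd, List.foldl_cons,
      ih _ x (fun h => hx (List.mem_cons_of_mem _ h))]

lemma ofList_cons (x : Int) (xs : List Int) :
    PySem.Set.ofList (x :: xs) = x :: PySem.Set.ofList (xs.filter (fun y => y != x)) := by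
  have h1 : PySem.Set.ofList (x :: xs) = xs.foldl PySem.Set.add [x] := by
    rw [PySem.Set.ofList_eq_foldl, List.foldl_cons]
    rfl
  rw [h1, foldl_add_filter xs [x] x (by simp)]
  have hnm : x ∉ xs.filter (fun y => y != x) := by
    simp [List.mem_filter]
  rw [foldl_add_cons_out _ [] x hnm]
  rfl

lemma pairSum_cons (x : Int) (xs : List Int) :
    pairSum (x :: xs)
      = PySem.Int.floordiv ((xs.count x : Int) + 1) 2
        + pairSum (xs.filter (fun y => y != x)) := by
  unfold pairSum
  rw [ofList_cons, List.map_cons, List.sum_cons]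
  congr 1
  · rw [List.count_cons_self]
    push_cast
    ring_nf
  · apply congrArg
    apply List.map_congr_left
    intro k hk
    have hk' : k ∈ xs.filter (fun y => y != x) := (PySem.Set.mem_ofList _ _).mp hk
    have hkx : k ≠ x := by
      have := (List.mem_filter.mp hk').2; simpa using this
    have hcnt : (xs.filter (fun y => y != x)).count k = xs.count k := by
      rw [List.count_filter]
      simp [hkx]
    have hcc : (x :: xs).count k = xs.count k := by
      simp [hkx.symm]
    rw [hcnt, hcc]

-- B's grouping loop on a sorted tail, cur = some c, all elements ≥ c.
lemma foldB (l : List Int) (hp : l.Pairwise (· ≤ ·)) :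
    ∀ (t r c : Int), (∀ x ∈ l, c ≤ x) →
      (l.foldl stepB (t, r, some c)).1
        + PySem.Int.floordiv (l.foldl stepB (t, r, some c)).2.1 2
      = t + PySem.Int.floordiv (r + (l.count c : Int)) 2
          + pairSum (l.filter (fun y => y != c)) := by
  induction l with
  | nil => intro t r c _; simp [pairSum]
  | cons x xs ih =>
    intro t r c hc
    have hx : c ≤ x := hc x (List.mem_cons_self ..)
    have hxs : ∀ y ∈ xs, x ≤ y := (List.pairwise_cons.mp hp).1
    have hp' : xs.Pairwise (· ≤ ·) := (List.pairwise_cons.mp hp).2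
    by_cases hxc : x = c
    · subst hxc
      have hbeq : (some x == some (x : Int)) = true := by simp
      rw [List.foldl_cons]
      show ((xs.foldl stepB (stepB (t, r, some x) x)).1
          + PySem.Int.floordiv (xs.foldl stepB (stepB (t, r, some x) x)).2.1 2) = _
      rw [show stepB (t, r, some x) x = (t, r + 1, some x) from by
        simp [stepB]]
      rw [ih hp' t (r + 1) x (fun y hy => le_trans hx (hxs y hy))]
      rw [List.count_cons_self, List.filter_cons]
      simp only [bne_self_eq_false, Bool.false_eq_true, if_false]
      push_cast
      rw [show r + 1 + ((xs.count x : Int)) = r + ((xs.count x : Int) + 1) from by ring]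
    · have hlt : c < x := lt_of_le_of_ne hx (fun h => hxc h.symm)
      have hcnot : c ∉ (x :: xs) := by
        intro hmem
        rcases List.mem_cons.mp hmem with h | h
        · exact hxc h.symm
        · exact absurd (hxs c h) (not_le.mpr hlt)
      have hcount : (x :: xs).count c = 0 := List.count_eq_zero.mpr hcnot
      have hfilter : (x :: xs).filter (fun y => y != c) = x :: xs := by
        apply List.filter_eq_self.mpr
        intro y hy
        simp only [bne_iff_ne, ne_eq]
        intro h; exact hcnot (h ▸ hy)
      rw [List.foldl_cons]
      rw [show stepB (t, r, some c) x
            = (t + PySem.Int.floordiv r 2, 1, some x) from by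
        simp [stepB, hxc]]
      rw [ih hp' (t + PySem.Int.floordiv r 2) 1 x hxs]
      rw [hcount, hfilter, pairSum_cons]
      push_cast
      rw [show (1 : Int) + (xs.count x : Int) = (xs.count x : Int) + 1 from by ring]
      ring_nf

lemma b_eq_pairSum_sorted (n : Int) (ar : List Int) :
    count_sock_pairs_alt n ar = pairSum (PySem.List.sorted ar (fun x => x) false) := by
  show ((PySem.List.sorted ar (fun x => x) false).foldl stepB (0, 0, none)).1
      + PySem.Int.floordiv ((PySem.List.sorted ar (fun x => x) false).foldl stepB (0, 0, none)).2.1 2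
    = pairSum (PySem.List.sorted ar (fun x => x) false)
  have hp : (PySem.List.sorted ar (fun x => x) false).Pairwise (· ≤ ·) := by
    simpa using PySem.List.sorted_pairwise ar (fun x => x)
  cases hs : PySem.List.sorted ar (fun x => x) false with
  | nil => simp [pairSum]
  | cons x xs =>
    rw [hs] at hp
    have hxs : ∀ y ∈ xs, x ≤ y := (List.pairwise_cons.mp hp).1
    have hp' : xs.Pairwise (· ≤ ·) := (List.pairwise_cons.mp hp).2
    rw [List.foldl_cons]
    rw [show stepB (0, 0, none) x = (0 + PySem.Int.floordiv 0 2, 1, some x) from by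
      simp [stepB]]
    rw [foldB xs hp' (0 + PySem.Int.floordiv 0 2) 1 x hxs]
    rw [pairSum_cons]
    rw [show PySem.Int.floordiv 0 2 = 0 from by decide]
    push_cast
    rw [show (1 : Int) + (xs.count x : Int) = (xs.count x : Int) + 1 from by ring]
    ring_nf

lemma pairSum_perm {l₁ l₂ : List Int} (h : l₁.Perm l₂) : pairSum l₁ = pairSum l₂ := by
  unfold pairSum
  have hperm : (PySem.Set.ofList l₁).Perm (PySem.Set.ofList l₂) := by
    rw [List.perm_ext_iff_of_nodup (PySem.Set.nodup_ofList _) (PySem.Set.nodup_ofList _)]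
    intro a
    rw [PySem.Set.mem_ofList, PySem.Set.mem_ofList]
    exact h.mem_iff
  have hmap : (PySem.Set.ofList l₂).map (fun k => PySem.Int.floordiv (l₁.count k : Int) 2)
      = (PySem.Set.ofList l₂).map (fun k => PySem.Int.floordiv (l₂.count k : Int) 2) := by
    apply List.map_congr_left
    intro k _
    rw [h.count_eq]
  calc ((PySem.Set.ofList l₁).map (fun k => PySem.Int.floordiv (l₁.count k : Int) 2)).sum
      = ((PySem.Set.ofList l₂).map (fun k => PySem.Int.floordiv (l₁.count k : Int) 2)).sum :=
        (hperm.map _).sum_eq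
    _ = _ := by rw [hmap]

-- ===== VERDICT (by name: the statement is the Claim_ definition above) =====
theorem count_sock_pairs_spec : Claim_equal_count_sock_pairs := by
  intro n ar _
  show count_sock_pairs n ar = count_sock_pairs_alt n ar
  rw [a_eq_pairSum, b_eq_pairSum_sorted,
    pairSum_perm (PySem.List.sorted_perm ar (fun x => x) false)]
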